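-- pv_equiv track=rewrite | github.com/Uninterpretable-Evolving-Blackbox/vep_ai_demo | vep_assistant.py | retrieve_examples_keyword
-- ===== SOURCE A (Python) =====
-- def retrieve_examples_keyword(training_examples, user_query, top_k=2):
--     """Keyword-based retrieval: score examples by word overlap with query.
--
--     Returns list of (score, example) tuples sorted by relevance.
--     """
--     query_words = set(user_query.lower().split())
--     scored = []
--     for ex in training_examples:
--         ex_text = f"{ex['user_query']} {ex['use_case_category']} {ex.get('justification', '')}".lower()
--         ex_words = set(ex_text.split())
--         overlap = len(query_words & ex_words)
--         scored.append((overlap, ex))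
--     scored.sort(key=lambda x: x[0], reverse=True)
--     return scored[:top_k]
-- ===== SOURCE B (Python) =====
-- def retrieve_examples_keyword(training_examples, user_query, top_k=2):
--     """Keyword-based retrieval via score buckets (counting sort) instead of a comparison sort."""
--     query_words = set(user_query.lower().split())
--     buckets = {}
--     for ex in training_examples:
--         ex_text = f"{ex['user_query']} {ex['use_case_category']} {ex.get('justification', '')}".lower()
--         overlap = len(query_words & set(ex_text.split()))
--         buckets[overlap] = buckets.get(overlap, []) + [ex]
--     result = []
--     for s in reversed(range(max(buckets, default=-1) + 1)):
--         result.extend((s, ex) for ex in buckets.get(s, []))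
--     return result[:top_k]
-- ===== Notes on version B (the rewrite author's own statement) =====
-- stated objective: alternative
-- what changed: B replaces A's comparison sort of (score, example) pairs by appending each example to a per-score bucket dict and concatenating the buckets from the maximal score down to 0 (a counting/bucket sort), preserving the stable tie order.
import Mathlib
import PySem

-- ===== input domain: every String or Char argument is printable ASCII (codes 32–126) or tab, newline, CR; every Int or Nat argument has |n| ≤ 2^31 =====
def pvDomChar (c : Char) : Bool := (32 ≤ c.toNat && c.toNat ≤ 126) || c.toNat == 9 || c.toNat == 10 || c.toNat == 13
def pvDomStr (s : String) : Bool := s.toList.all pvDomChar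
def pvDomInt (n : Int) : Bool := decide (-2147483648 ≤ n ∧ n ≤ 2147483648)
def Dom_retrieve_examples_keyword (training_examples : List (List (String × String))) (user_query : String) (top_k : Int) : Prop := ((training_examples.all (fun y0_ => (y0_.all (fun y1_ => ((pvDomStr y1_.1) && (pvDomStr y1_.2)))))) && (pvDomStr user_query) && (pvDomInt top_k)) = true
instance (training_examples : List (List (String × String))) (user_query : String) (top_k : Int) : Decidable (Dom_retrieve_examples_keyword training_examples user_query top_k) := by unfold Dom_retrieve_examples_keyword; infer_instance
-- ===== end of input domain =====

-- B replaces A's comparison sort of (score, example) pairs by score buckets traversed from the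
-- maximal score down (a counting/bucket sort); objective: alternative algorithm, same result.


-- ===== PORT A =====
-- shared scoring step (identical in Source A and Source B): build the lowered example text and
-- count the overlap of its word set with the query word set
def pvExScore (query_words : PySem.Set String) (ex : List (String × String)) : Int :=
  let ex_text := PySem.Str.lower
    ((PySem.Dict.mk ex).getD "user_query" "" ++ " " ++
     (PySem.Dict.mk ex).getD "use_case_category" "" ++ " " ++
     (PySem.Dict.mk ex).getD "justification" "")
  ((PySem.Set.inter query_words (PySem.Set.ofList (PySem.Str.split₀ ex_text))).length : Int)

def retrieve_examples_keyword (training_examples : List (List (String × String))) (user_query : String) (top_k : Int) : List (Int × (List (String × String))) :=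
  let query_words : PySem.Set String := PySem.Set.ofList (PySem.Str.split₀ (PySem.Str.lower user_query))
  let scored := training_examples.foldl
    (fun acc ex => acc ++ [(pvExScore query_words ex, ex)]) []
  PySem.List.slice (PySem.List.sorted scored (fun p => p.1) true) none (some top_k)

-- ===== PORT B =====
def retrieve_examples_keyword_alt (training_examples : List (List (String × String))) (user_query : String) (top_k : Int) : List (Int × (List (String × String))) :=
  let query_words : PySem.Set String := PySem.Set.ofList (PySem.Str.split₀ (PySem.Str.lower user_query))
  let buckets := training_examples.foldl
    (fun d ex => d.modify (pvExScore query_words ex) [] (fun cur => cur ++ [ex]))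
    PySem.Dict.empty
  let result := ((PySem.List.pyRange 0 (PySem.List.maxD buckets.keys (fun s => s) (-1) + 1) 1).reverse).foldl
    (fun acc s => acc ++ (buckets.getD s []).map (fun ex => (s, ex))) []
  PySem.List.slice result none (some top_k)

-- ===== PRECONDITION & SPEC =====
-- Pre_ excludes exactly the examples on which Python A raises KeyError: every example dict
-- must carry the keys "user_query" and "use_case_category" (justification is optional).
def Pre_retrieve_examples_keyword (training_examples : List (List (String × String))) (user_query : String) (top_k : Int) : Prop :=
  ∀ ex ∈ training_examples, "user_query" ∈ ex.map Prod.fst ∧ "use_case_category" ∈ ex.map Prod.fst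
instance (training_examples : List (List (String × String))) (user_query : String) (top_k : Int) : Decidable (Pre_retrieve_examples_keyword training_examples user_query top_k) := by unfold Pre_retrieve_examples_keyword; infer_instance

def pvWitness_retrieve_examples_keyword : (List (List (String × String))) × String × Int :=
  ([[("user_query", "hello world"), ("use_case_category", "greet")],
    [("user_query", "other"), ("use_case_category", "misc"), ("justification", "hello")]],
   "Hello there", 2)

def Spec_retrieve_examples_keyword (training_examples : List (List (String × String))) (user_query : String) (top_k : Int) (out : List (Int × (List (String × String)))) : Prop := out = retrieve_examples_keyword_alt training_examples user_query top_k
instance (training_examples : List (List (String × String))) (user_query : String) (top_k : Int) (out : List (Int × (List (String × String)))) : Decidable (Spec_retrieve_examples_keyword training_examples user_query top_k out) := by unfold Spec_retrieve_examples_keyword; infer_instance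

-- ===== CLAIM (what is proved, stated in full; the proofs are below) =====
def Claim_equal_retrieve_examples_keyword : Prop := ∀ (training_examples : List (List (String × String))) (user_query : String) (top_k : Int), Dom_retrieve_examples_keyword training_examples user_query top_k → Pre_retrieve_examples_keyword training_examples user_query top_k → Spec_retrieve_examples_keyword training_examples user_query top_k (retrieve_examples_keyword training_examples user_query top_k)

-- ===== LEMMAS AND PROOFS =====

-- the entry type of the scored list
abbrev PVE : Type := Int × (List (String × String))

-- the score-s bucket of the scored list
def pvF (s : Int) (l : List PVE) : List PVE := l.filter (fun p => p.1 == s)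

-- buckets for scores n, n-1, …, 0 concatenated
def pvG : Nat → List PVE → List PVE
  | 0, l => pvF 0 l
  | n + 1, l => pvF ((n : Int) + 1) l ++ pvG n l

lemma pvG_nil (n : Nat) : pvG n [] = [] := by
  induction n with
  | zero => rfl
  | succ n ih => simp [pvG, pvF, ih]

lemma mem_pvG {p : PVE} {n : Nat} {l : List PVE} (h : p ∈ pvG n l) :
    p ∈ l ∧ 0 ≤ p.1 ∧ p.1 ≤ (n : Int) := by
  induction n with
  | zero =>
    simp only [pvG, pvF, List.mem_filter, beq_iff_eq] at h
    exact ⟨h.1, by omega, by omega⟩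

  | succ n ih =>
    simp only [pvG, List.mem_append] at h
    rcases h with h | h
    · simp only [pvF, List.mem_filter, beq_iff_eq] at h
      exact ⟨h.1, by omega, by omega⟩
    · obtain ⟨h1, h2, h3⟩ := ih h
      exact ⟨h1, h2, by push_cast; omega⟩

lemma pvF_append_singleton (s : Int) (l : List PVE) (x : PVE) :
    pvF s (l ++ [x]) = pvF s l ++ (if x.1 = s then [x] else []) := by
  by_cases h : x.1 = s <;> simp [pvF, List.filter_append, h]

lemma pvG_append_singleton_of_gt {n : Nat} {x : PVE} (hx : (n : Int) < x.1) (l : List PVE) :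
    pvG n (l ++ [x]) = pvG n l := by
  induction n with
  | zero => simp [pvG, pvF_append_singleton, show ¬ x.1 = 0 by omega]
  | succ n ih =>
    have hn : (n : Int) < x.1 := by push_cast at hx ⊢; omega
    have hne : ¬ x.1 = (n : Int) + 1 := by push_cast at hx; omega
    simp [pvG, pvF_append_singleton, hne, ih hn]

lemma pvInsertBy_append_left {α : Type} (bf : α → α → Bool) (x : α) (as bs : List α)
    (h : ∀ a ∈ as, bf x a = false) :
    PySem.List.insertBy bf x (as ++ bs) = as ++ PySem.List.insertBy bf x bs := by
  induction as with
  | nil => rfl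
  | cons a as ih =>
    have ha : bf x a = false := h a (by simp)
    simp [PySem.List.insertBy, ha, ih (fun a ha' => h a (by simp [ha']))]

lemma pvInsertBy_all_before {α : Type} (bf : α → α → Bool) (x : α) (bs : List α)
    (h : ∀ b ∈ bs, bf x b = true) :
    PySem.List.insertBy bf x bs = x :: bs := by
  cases bs with
  | nil => rfl
  | cons b bs => simp [PySem.List.insertBy, h b (by simp)]

-- inserting an in-range element into the bucket concatenation lands at the end of its bucket
lemma pvInsert_pvG (n : Nat) (x : PVE) (l : List PVE) (hx0 : 0 ≤ x.1) (hxn : x.1 ≤ (n : Int)) :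
    PySem.List.insertBy (fun a b : PVE => decide (b.1 < a.1)) x (pvG n l) = pvG n (l ++ [x]) := by
  induction n with
  | zero =>
    have hx : x.1 = 0 := by omega
    rw [PySem.List.insertBy_of_forall_not_before]
    · simp [pvG, pvF_append_singleton, hx]
    · intro y hy
      obtain ⟨-, hy1, hy2⟩ := mem_pvG (n := 0) (by simpa [pvG] using hy)
      simp only [decide_eq_false_iff_not, not_lt]
      omega
  | succ n ih =>
    by_cases hx : x.1 = (n : Int) + 1
    · rw [pvG, pvInsertBy_append_left, pvInsertBy_all_before]
      · have hgt : (n : Int) < x.1 := by omega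
        simp [pvG, pvF_append_singleton, hx, pvG_append_singleton_of_gt hgt]
      · intro b hb
        have := (mem_pvG hb).2.2
        simp only [decide_eq_true_eq]
        omega
      · intro a ha
        have : a.1 = (n : Int) + 1 := by
          simpa [pvF] using (List.mem_filter.mp ha).2
        simp only [decide_eq_false_iff_not, not_lt]
        omega
    · have hxn' : x.1 ≤ (n : Int) := by push_cast at hxn; omega
      rw [pvG, pvInsertBy_append_left, ih hxn']
      · simp [pvG, pvF_append_singleton, show ¬ x.1 = (n : Int) + 1 from hx]
      · intro a ha
        have : a.1 = (n : Int) + 1 := by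
          simpa [pvF] using (List.mem_filter.mp ha).2
        simp only [decide_eq_false_iff_not, not_lt]
        omega

-- Python's stable reverse sort by score IS the descending bucket concatenation
lemma pvSorted_eq_pvG (n : Nat) (l : List PVE)
    (h : ∀ p ∈ l, 0 ≤ p.1 ∧ p.1 ≤ (n : Int)) :
    PySem.List.sorted l (fun p => p.1) true = pvG n l := by
  induction l using List.reverseRecOn with
  | nil => rw [pvG_nil]; rfl
  | append_singleton l x ih =>
    rw [PySem.List.sorted_rev_eq_foldl_insertBy, List.foldl_append,
        ← PySem.List.sorted_rev_eq_foldl_insertBy,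
        ih (fun p hp => h p (by simp [hp]))]
    simpa using pvInsert_pvG n x l (h x (by simp)).1 (h x (by simp)).2

-- the reversed range loop enumerates exactly the buckets n, n-1, …, 0
lemma pvRange_flatMap (n : Nat) (l : List PVE) :
    ((PySem.List.pyRange 0 ((n : Int) + 1) 1).reverse).flatMap (fun s => pvF s l) = pvG n l := by
  induction n with
  | zero =>
    rw [show ((0 : Nat) : Int) + 1 = 0 + 1 by norm_num, PySem.List.pyRange_one_singleton]
    simp [pvG]
  | succ n ih =>
    have hsplit : PySem.List.pyRange 0 (((n : Nat) + 1 : Int) + 1) 1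
        = PySem.List.pyRange 0 ((n : Int) + 1) 1 ++ [(n : Int) + 1] := by
      exact_mod_cast PySem.List.pyRange_one_succ_right (a := 0) (b := (n : Int) + 1) (by omega)
    push_cast
    rw [hsplit, List.reverse_append, List.reverse_singleton, List.singleton_append,
        List.flatMap_cons, ih]
    simp [pvG]

lemma pvF_pairs (s : Int) (l : List PVE) :
    (l.filter (fun p => p.1 == s)).map (fun p => (s, p.2)) = pvF s l := by
  rw [pvF, show (l.filter (fun p => p.1 == s)).map (fun p => (s, p.2))
      = (l.filter (fun p => p.1 == s)).map id from
    List.map_congr_left (fun p hp => by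
      have : p.1 = s := by simpa using (List.mem_filter.mp hp).2
      simp [← this])]
  simp

-- ===== VERDICT (by name: the statement is the Claim_ definition above) =====
theorem retrieve_examples_keyword_spec : Claim_equal_retrieve_examples_keyword := by
  intro tes uq top_k _hdom _hpre
  unfold Spec_retrieve_examples_keyword retrieve_examples_keyword retrieve_examples_keyword_alt
  dsimp only
  set qw : PySem.Set String := PySem.Set.ofList (PySem.Str.split₀ (PySem.Str.lower uq)) with hqw
  -- A's append loop is a map
  rw [PySem.List.foldl_append_singleton_eq_map (f := fun ex => (pvExScore qw ex, ex))]
  set scored : List PVE := tes.map (fun ex => (pvExScore qw ex, ex)) with hscored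
  simp only [List.nil_append]
  -- B's bucket dict, re-read over the scored pairs
  rw [← List.foldl_map (f := fun ex => (pvExScore qw ex, ex))
      (g := fun (d : PySem.Dict Int (List (List (String × String)))) p =>
        d.modify p.1 [] (fun cur => cur ++ [p.2]))]
  set buckets := scored.foldl
      (fun (d : PySem.Dict Int (List (List (String × String)))) p =>
        d.modify p.1 [] (fun cur => cur ++ [p.2])) PySem.Dict.empty with hbuckets
  have hgetD : ∀ s : Int, buckets.getD s [] = (scored.filter (fun p => p.1 == s)).map (·.2) := by
    intro s
    rw [hbuckets, PySem.Dict.getD_foldl_modify_append scored PySem.Dict.empty s]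
    simp
  have hkeys : buckets.keys = PySem.Set.ofList (scored.map (·.1)) := by
    rw [hbuckets,
        PySem.Dict.keys_foldl_modify_key scored (fun p => p.1) []
          (fun _ p => (fun cur => cur ++ [p.2])) PySem.Dict.empty]
    simp [PySem.Set.update_nil_left]
  congr 1
  -- both sums now talk about scored
  cases htes : tes with
  | nil => subst htes; simp [hscored, hbuckets]; rfl
  | cons e rest =>
    -- the key list is nonempty, so max picks a genuine maximal score m ≥ 0
    have hscne : scored.map (·.1) ≠ [] := by simp [hscored, htes]
    have hkne : buckets.keys ≠ [] := by
      rw [hkeys]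
      cases hsc : scored.map (·.1) with
      | nil => exact absurd hsc hscne
      | cons a t => simp [PySem.Set.ofList_cons]
    obtain ⟨m, hm⟩ : ∃ m, PySem.List.max? buckets.keys (fun s => s) = some m := by
      cases hmx : PySem.List.max? buckets.keys (fun s => s) with
      | none => exact absurd ((PySem.List.max?_eq_none_iff _ _).mp hmx) hkne
      | some m => exact ⟨m, rfl⟩
    have hmaxD : PySem.List.maxD buckets.keys (fun s => s) (-1) = m := by
      simp [PySem.List.maxD, hm]
    have hmem : m ∈ scored.map (·.1) := by
      have := PySem.List.max?_mem hm
      rw [hkeys] at this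
      exact (PySem.Set.mem_ofList _ _).mp this
    have hm0 : 0 ≤ m := by
      obtain ⟨p, hp, hp1⟩ := List.mem_map.mp hmem
      obtain ⟨ex, -, hex⟩ := List.mem_map.mp (hscored ▸ hp)
      subst hp1
      rw [← hex]
      exact Int.natCast_nonneg _
    have hbound : ∀ p ∈ scored, 0 ≤ p.1 ∧ p.1 ≤ m := by
      intro p hp
      constructor
      · obtain ⟨ex, _, hex⟩ := List.mem_map.mp (hscored ▸ hp)
        rw [← hex]
        exact Int.natCast_nonneg _
      · have hpk : p.1 ∈ buckets.keys := by
          rw [hkeys, PySem.Set.mem_ofList]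
          exact List.mem_map_of_mem hp
        exact PySem.List.max?_isMax hm p.1 hpk
    have hmn : ((m.toNat : Nat) : Int) = m := Int.toNat_of_nonneg hm0
    rw [hmaxD,
        PySem.List.foldl_append_eq_flatMap
          (g := fun s => (buckets.getD s []).map (fun ex => (s, ex)))]
    simp only [List.nil_append]
    have hfun : (fun s => (buckets.getD s []).map (fun ex => (s, ex)))
        = fun s => pvF s scored := by
      funext s
      rw [hgetD s, List.map_map]
      exact pvF_pairs s scored
    rw [hfun, ← hmn, pvRange_flatMap m.toNat scored,
        pvSorted_eq_pvG m.toNat scored (fun p hp => (hmn ▸ hbound p hp : _))]
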